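-- pv_equiv track=rewrite | github.com/tr4m0ryp/clay-enrichment | src/utils/json_extract.py | _shrink_to_balanced
-- ===== SOURCE A (Python) =====
-- def _shrink_to_balanced(s: str) -> str | None:
--     """Walk ``s`` and return the slice ending at the first balanced close.
--
--     The input must begin with ``{`` or ``[``; the function returns the
--     smallest prefix whose brace/bracket depth returns to zero. Strings
--     inside the JSON are skipped so braces/brackets inside string literals
--     do not perturb the depth counter. Backslash escapes inside strings
--     are honoured.
--
--     Returns ``None`` when ``s`` does not start with an opener or never
--     balances.
--     """
--     if not s:
--         return None
--     open_ch = s[0]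
--     if open_ch == "{":
--         close_ch = "}"
--     elif open_ch == "[":
--         close_ch = "]"
--     else:
--         return None
--
--     depth = 0
--     in_string = False
--     escape = False
--     for i, ch in enumerate(s):
--         if in_string:
--             if escape:
--                 escape = False
--                 continue
--             if ch == "\\":
--                 escape = True
--                 continue
--             if ch == '"':
--                 in_string = False
--             continue
--         if ch == '"':
--             in_string = True
--             continue
--         if ch == open_ch:
--             depth += 1
--         elif ch == close_ch:
--             depth -= 1
--             if depth == 0:
--                 return s[: i + 1]
--     return None
-- ===== SOURCE B (Python) =====
-- def _mask_strings(s: str) -> str: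
--     """Replace every JSON string literal (quotes, contents, escapes) with
--     equal-length runs of spaces, preserving all positions; an unterminated
--     string masks to the end."""
--     out = []
--     i, n = 0, len(s)
--     while i < n:
--         ch = s[i]
--         if ch == '"':
--             out.append(' ')
--             i += 1
--             while i < n:
--                 c = s[i]
--                 if c == '\\':
--                     if i + 1 < n:
--                         out.append('  ')
--                         i += 2
--                     else:
--                         out.append(' ')
--                         i += 1
--                 elif c == '"':
--                     out.append(' ')
--                     i += 1
--                     break
--                 else:
--                     out.append(' ')
--                     i += 1
--         else:
--             out.append(ch)
--             i += 1
--     return ''.join(out)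
--
--
-- def _shrink_to_balanced(s: str) -> str | None:
--     if not s:
--         return None
--     if s[0] == "{":
--         open_ch, close_ch = "{", "}"
--     elif s[0] == "[":
--         open_ch, close_ch = "[", "]"
--     else:
--         return None
--     depth = 0
--     for i, ch in enumerate(_mask_strings(s)):
--         if ch == open_ch:
--             depth += 1
--         elif ch == close_ch:
--             depth -= 1
--             if depth == 0:
--                 return s[: i + 1]
--     return None
-- ===== Notes on version B (the rewrite author's own statement) =====
-- stated objective: alternative
-- what changed: B replaces A's single fused scan with in-string/escape/depth state by two passes: first mask every JSON string literal with equal-length runs of spaces (positions preserved, unterminated strings masked to the end), then a plain bracket-depth count over the masked text with no string or escape state.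
import Mathlib
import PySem

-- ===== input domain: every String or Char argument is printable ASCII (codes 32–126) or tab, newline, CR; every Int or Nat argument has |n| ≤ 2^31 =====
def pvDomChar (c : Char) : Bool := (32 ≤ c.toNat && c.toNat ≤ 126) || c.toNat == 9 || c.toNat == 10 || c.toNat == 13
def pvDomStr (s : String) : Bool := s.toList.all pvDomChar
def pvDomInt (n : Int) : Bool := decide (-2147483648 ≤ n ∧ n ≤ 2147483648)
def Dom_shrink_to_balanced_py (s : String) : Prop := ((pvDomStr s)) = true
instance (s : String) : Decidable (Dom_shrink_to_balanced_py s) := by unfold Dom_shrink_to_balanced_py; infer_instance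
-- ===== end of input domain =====

-- B replaces A's fused in-string/escape/depth state machine by two passes: mask all
-- string literals with spaces, then count only bracket depth (objective: alternative).

-- ===== PORT A =====
-- A's single loop over enumerate(s) with state (depth, in_string, escape); returns s[:i+1]
-- at the first point depth returns to 0.
def loopA (oc cc : Char) (cs : List Char) (i : Nat) (depth : Int)
    (inStr esc : Bool) (orig : List Char) : Option String :=
  match cs with
  | [] => none
  | ch :: rest =>
    if inStr then
      if esc then loopA oc cc rest (i+1) depth true false orig
      else if ch = '\\' then loopA oc cc rest (i+1) depth true true orig
      else if ch = '"' then loopA oc cc rest (i+1) depth false false orig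
      else loopA oc cc rest (i+1) depth true false orig
    else if ch = '"' then loopA oc cc rest (i+1) depth true false orig
    else if ch = oc then loopA oc cc rest (i+1) (depth+1) false false orig
    else if ch = cc then
      if depth - 1 = 0 then some (String.mk (orig.take (i+1)))
      else loopA oc cc rest (i+1) (depth-1) false false orig
    else loopA oc cc rest (i+1) depth false false orig

def shrink_to_balanced_py (s : String) : Option String :=
  match s.toList with
  | [] => none
  | c0 :: _ =>
    if c0 = '{' then loopA '{' '}' s.toList 0 0 false false s.toList
    else if c0 = '[' then loopA '[' ']' s.toList 0 0 false false s.toList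
    else none

-- ===== PORT B =====
-- B's masking pass (Python's outer/inner while loops over index i < n, as one
-- recursion on the remaining character budget with an in-string mode flag);
-- a backslash inside a string consumes two characters.
def maskFuel : Nat → Bool → List Char → List Char
  | 0, _, _ => []
  | Nat.succ n, inStr, cs =>
    match cs with
    | [] => []
    | ch :: rest =>
      if inStr then
        if ch = '\\' then
          match rest with
          | [] => [' ']
          | _ :: rest' => ' ' :: ' ' :: maskFuel n true rest'
        else if ch = '"' then ' ' :: maskFuel n false rest
        else ' ' :: maskFuel n true rest
      else if ch = '"' then ' ' :: maskFuel n true rest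
      else ch :: maskFuel n false rest

def maskGo (inStr : Bool) (cs : List Char) : List Char := maskFuel cs.length inStr cs

-- B's second pass: plain depth counting over the masked text.
def countLoop (oc cc : Char) (cs : List Char) (i : Nat) (depth : Int)
    (orig : List Char) : Option String :=
  match cs with
  | [] => none
  | ch :: rest =>
    if ch = oc then countLoop oc cc rest (i+1) (depth+1) orig
    else if ch = cc then
      if depth - 1 = 0 then some (String.mk (orig.take (i+1)))
      else countLoop oc cc rest (i+1) (depth-1) orig
    else countLoop oc cc rest (i+1) depth orig

def shrink_to_balanced_py_alt (s : String) : Option String :=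
  match s.toList with
  | [] => none
  | c0 :: _ =>
    if c0 = '{' then countLoop '{' '}' (maskGo false s.toList) 0 0 s.toList
    else if c0 = '[' then countLoop '[' ']' (maskGo false s.toList) 0 0 s.toList
    else none

-- ===== PRECONDITION & SPEC =====
def Spec_shrink_to_balanced_py (s : String) (out : Option String) : Prop := out = shrink_to_balanced_py_alt s
instance (s : String) (out : Option String) : Decidable (Spec_shrink_to_balanced_py s out) := by unfold Spec_shrink_to_balanced_py; infer_instance

-- ===== CLAIM (what is proved, stated in full; the proofs are below) =====
def Claim_equal_shrink_to_balanced_py : Prop := ∀ (s : String), Dom_shrink_to_balanced_py s → Spec_shrink_to_balanced_py s (shrink_to_balanced_py s)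

-- ===== LEMMAS AND PROOFS =====

-- One-step unfolding lemmas for the three loops.
theorem loopA_out (oc cc ch : Char) (rest : List Char) (i : Nat) (depth : Int) (orig : List Char) :
    loopA oc cc (ch :: rest) i depth false false orig =
      if ch = '"' then loopA oc cc rest (i+1) depth true false orig
      else if ch = oc then loopA oc cc rest (i+1) (depth+1) false false orig
      else if ch = cc then
        if depth - 1 = 0 then some (String.mk (orig.take (i+1)))
        else loopA oc cc rest (i+1) (depth-1) false false orig
      else loopA oc cc rest (i+1) depth false false orig := by
  simp [loopA]

theorem loopA_in (oc cc ch : Char) (rest : List Char) (i : Nat) (depth : Int) (orig : List Char) :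
    loopA oc cc (ch :: rest) i depth true false orig =
      if ch = '\\' then loopA oc cc rest (i+1) depth true true orig
      else if ch = '"' then loopA oc cc rest (i+1) depth false false orig
      else loopA oc cc rest (i+1) depth true false orig := by
  simp [loopA]

theorem loopA_esc (oc cc ch : Char) (rest : List Char) (i : Nat) (depth : Int) (orig : List Char) :
    loopA oc cc (ch :: rest) i depth true true orig =
      loopA oc cc rest (i+1) depth true false orig := by
  simp [loopA]

theorem maskFuel_out (n : Nat) (ch : Char) (rest : List Char) :
    maskFuel (n+1) false (ch :: rest) =
      if ch = '"' then ' ' :: maskFuel n true rest else ch :: maskFuel n false rest := by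
  simp [maskFuel]

theorem maskFuel_nil (n : Nat) (m : Bool) : maskFuel n m [] = [] := by
  cases n <;> simp [maskFuel]

theorem maskFuel_in_cons (n : Nat) (ch r : Char) (rest' : List Char) :
    maskFuel (n+1) true (ch :: r :: rest') =
      if ch = '\\' then ' ' :: ' ' :: maskFuel n true rest'
      else if ch = '"' then ' ' :: maskFuel n false (r :: rest')
      else ' ' :: maskFuel n true (r :: rest') := by
  simp [maskFuel]

theorem countLoop_cons (oc cc ch : Char) (rest : List Char) (i : Nat) (depth : Int) (orig : List Char) :
    countLoop oc cc (ch :: rest) i depth orig =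
      if ch = oc then countLoop oc cc rest (i+1) (depth+1) orig
      else if ch = cc then
        if depth - 1 = 0 then some (String.mk (orig.take (i+1)))
        else countLoop oc cc rest (i+1) (depth-1) orig
      else countLoop oc cc rest (i+1) depth orig := by
  simp [countLoop]

-- Main invariant: A's loop in the "outside string" state equals B's count over
-- maskGo false, and in the "inside string, no pending escape" state equals B's
-- count over maskGo true (masked characters are spaces, which the count pass
-- skips).  By strong induction via a length bound, since masking a backslash
-- consumes two characters at once.
theorem mask_main (oc cc : Char) (hoc' : oc ≠ ' ') (hcc' : cc ≠ ' ') :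
    ∀ (n : Nat) (cs : List Char), cs.length ≤ n → ∀ (i : Nat) (depth : Int) (orig : List Char),
      loopA oc cc cs i depth false false orig = countLoop oc cc (maskFuel n false cs) i depth orig
      ∧ loopA oc cc cs i depth true false orig = countLoop oc cc (maskFuel n true cs) i depth orig := by
  intro n
  induction n with
  | zero =>
    intro cs hlen i depth orig
    cases cs with
    | nil => simp [loopA, maskFuel, countLoop]
    | cons ch rest => simp at hlen
  | succ n ih =>
    intro cs hlen i depth orig
    cases cs with
    | nil => simp [loopA, maskFuel, countLoop]
    | cons ch rest =>
      have hrest : rest.length ≤ n := by simp at hlen; omega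
      refine ⟨?_, ?_⟩
      · -- outside-string state
        rw [loopA_out, maskFuel_out]
        by_cases hq : ch = '"'
        · rw [if_pos hq, if_pos hq, countLoop_cons,
            if_neg (Ne.symm hoc'), if_neg (Ne.symm hcc')]
          exact (ih rest hrest (i+1) depth orig).2
        · rw [if_neg hq, if_neg hq, countLoop_cons]
          by_cases ho : ch = oc
          · rw [if_pos ho, if_pos ho]
            exact (ih rest hrest (i+1) (depth+1) orig).1
          · rw [if_neg ho, if_neg ho]
            by_cases hc : ch = cc
            · rw [if_pos hc, if_pos hc]
              by_cases hd : depth - 1 = 0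
              · rw [if_pos hd, if_pos hd]
              · rw [if_neg hd, if_neg hd]
                exact (ih rest hrest (i+1) (depth-1) orig).1
            · rw [if_neg hc, if_neg hc]
              exact (ih rest hrest (i+1) depth orig).1
      · -- inside-string state, no pending escape
        by_cases hb : ch = '\\'
        · subst hb
          cases rest with
          | nil => simp [loopA, maskFuel, countLoop, Ne.symm hoc', Ne.symm hcc']
          | cons r rest' =>
            have hrest' : rest'.length ≤ n := by simp at hlen; omega
            rw [loopA_in, if_pos rfl, loopA_esc, maskFuel_in_cons, if_pos rfl,
              countLoop_cons, if_neg (Ne.symm hoc'), if_neg (Ne.symm hcc'),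
              countLoop_cons, if_neg (Ne.symm hoc'), if_neg (Ne.symm hcc')]
            exact (ih rest' hrest' (i+1+1) depth orig).2
        · cases rest with
          | nil =>
            by_cases hq : ch = '"' <;>
              simp [loopA, maskFuel, maskFuel_nil, countLoop, hb, hq, Ne.symm hoc', Ne.symm hcc']
          | cons r rest' =>
            rw [loopA_in, if_neg hb, maskFuel_in_cons, if_neg hb]
            by_cases hq : ch = '"'
            · rw [if_pos hq, if_pos hq, countLoop_cons,
                if_neg (Ne.symm hoc'), if_neg (Ne.symm hcc')]
              exact (ih (r :: rest') hrest (i+1) depth orig).1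
            · rw [if_neg hq, if_neg hq, countLoop_cons,
                if_neg (Ne.symm hoc'), if_neg (Ne.symm hcc')]
              exact (ih (r :: rest') hrest (i+1) depth orig).2

-- ===== VERDICT (by name: the statement is the Claim_ definition above) =====
theorem shrink_to_balanced_py_spec : Claim_equal_shrink_to_balanced_py := by
  unfold Claim_equal_shrink_to_balanced_py Spec_shrink_to_balanced_py
  intro s _
  unfold shrink_to_balanced_py shrink_to_balanced_py_alt
  cases h : s.toList with
  | nil => simp
  | cons c0 cs =>
    by_cases h1 : c0 = '{'
    · simp only [if_pos h1, maskGo]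
      exact (mask_main '{' '}' (by decide) (by decide)
        (c0 :: cs).length (c0 :: cs) le_rfl 0 0 (c0 :: cs)).1
    · by_cases h2 : c0 = '['
      · simp only [if_neg h1, if_pos h2, maskGo]
        exact (mask_main '[' ']' (by decide) (by decide)
          (c0 :: cs).length (c0 :: cs) le_rfl 0 0 (c0 :: cs)).1
      · simp [if_neg h1, if_neg h2]
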